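-- pv_equiv track=rewrite | github.com/pschmitt/stricknani | stricknani/importing/importer.py | _match_garnstudio_yarn_link_name
-- ===== SOURCE A (Python) =====
-- def _match_garnstudio_yarn_link_name(
--     line: str, yarn_links: dict[str, dict[str, str]]
-- ) -> str | None:
--     if not yarn_links:
--         return None
--
--     line_lower = line.lower()
--     for candidate in sorted(yarn_links.keys(), key=len, reverse=True):
--         if candidate and candidate in line_lower:
--             return candidate
--     return None
-- ===== SOURCE B (Python) =====
-- def _match_garnstudio_yarn_link_name(
--     line: str, yarn_links: dict[str, dict[str, str]]
-- ) -> str | None: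
--     # Single pass, no sorting: keep the longest non-empty matching key;
--     # a strictly-greater update preserves the earliest key on length ties,
--     # which is exactly A's stable sort-by-length-descending order.
--     line_lower = line.lower()
--     best = None
--     for candidate in yarn_links:
--         if candidate and (best is None or len(candidate) > len(best)) and candidate in line_lower:
--             best = candidate
--     return best
-- ===== Notes on version B (the rewrite author's own statement) =====
-- stated objective: simpler
-- what changed: Replaces sort-keys-by-length-descending-then-return-first-substring-match with a single unsorted pass that keeps the longest matching key, updating only on strictly greater length so dict order breaks ties exactly as the stable sort did.
import Mathlib
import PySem

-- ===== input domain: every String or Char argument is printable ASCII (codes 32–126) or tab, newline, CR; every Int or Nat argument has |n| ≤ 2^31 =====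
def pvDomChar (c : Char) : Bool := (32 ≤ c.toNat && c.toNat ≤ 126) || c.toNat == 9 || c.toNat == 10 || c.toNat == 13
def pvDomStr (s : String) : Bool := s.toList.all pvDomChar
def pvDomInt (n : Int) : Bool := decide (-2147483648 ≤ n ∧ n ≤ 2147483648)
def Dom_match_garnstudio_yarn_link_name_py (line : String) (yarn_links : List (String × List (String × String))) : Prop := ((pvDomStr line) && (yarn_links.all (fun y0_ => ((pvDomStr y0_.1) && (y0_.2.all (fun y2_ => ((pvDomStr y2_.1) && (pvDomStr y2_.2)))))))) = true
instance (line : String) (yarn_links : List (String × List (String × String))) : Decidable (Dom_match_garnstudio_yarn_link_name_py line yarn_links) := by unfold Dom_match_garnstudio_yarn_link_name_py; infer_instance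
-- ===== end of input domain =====

-- B replaces A's sort-by-length-descending + first-match scan with a single
-- unsorted pass keeping the longest matching key (objective: simpler).

-- ===== PORT A =====
-- dict keys in insertion order = dedup of the association list's first components
def match_garnstudio_yarn_link_name_py (line : String) (yarn_links : List (String × List (String × String))) : Option String :=
  if yarn_links = [] then none
  else
    let line_lower := PySem.Str.lower line
    List.find? (fun candidate => (candidate != "") && PySem.Str.isIn candidate line_lower)
      (PySem.List.sorted (PySem.List.dedup (yarn_links.map Prod.fst)) (fun k => PySem.Str.len k) true)

-- ===== PORT B =====
def match_garnstudio_yarn_link_name_py_alt (line : String) (yarn_links : List (String × List (String × String))) : Option String :=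
  let line_lower := PySem.Str.lower line
  (PySem.List.dedup (yarn_links.map Prod.fst)).foldl
    (fun best candidate =>
      if (candidate != "")
          && (match best with | none => true | some b => decide (PySem.Str.len b < PySem.Str.len candidate))
          && PySem.Str.isIn candidate line_lower
      then some candidate else best)
    none

-- ===== PRECONDITION & SPEC =====
def Spec_match_garnstudio_yarn_link_name_py (line : String) (yarn_links : List (String × List (String × String))) (out : Option String) : Prop := out = match_garnstudio_yarn_link_name_py_alt line yarn_links
instance (line : String) (yarn_links : List (String × List (String × String))) (out : Option String) : Decidable (Spec_match_garnstudio_yarn_link_name_py line yarn_links out) := by unfold Spec_match_garnstudio_yarn_link_name_py; infer_instance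

-- ===== CLAIM (what is proved, stated in full; the proofs are below) =====
def Claim_equal_match_garnstudio_yarn_link_name_py : Prop := ∀ (line : String) (yarn_links : List (String × List (String × String))), Dom_match_garnstudio_yarn_link_name_py line yarn_links → Spec_match_garnstudio_yarn_link_name_py line yarn_links (match_garnstudio_yarn_link_name_py line yarn_links)

-- ===== LEMMAS AND PROOFS =====

-- B's fold step, abstracted over the match predicate p and the length key.
def pvUpd {α : Type} (p : α → Bool) (key : α → Int) (best : Option α) (x : α) : Option α :=
  if p x && (match best with | none => true | some b => decide (key b < key x))
  then some x else best

-- Inserting x into a key-descending list and then taking the first p-element: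
-- either x beats (strictly) the previous first p-element, or nothing changes.
theorem pvFind_insertBy {α : Type} (p : α → Bool) (key : α → Int) (x : α) (s : List α)
    (hs : s.Pairwise (fun a b => key b ≤ key a)) :
    List.find? p (PySem.List.insertBy (fun a b => decide (key b < key a)) x s)
      = pvUpd p key (List.find? p s) x := by
  induction s with
  | nil =>
    simp [PySem.List.insertBy, pvUpd, List.find?]
  | cons y ys ih =>
    have hy : ∀ b ∈ ys, key b ≤ key y := fun b hb => List.rel_of_pairwise_cons hs hb
    have hs' : ys.Pairwise (fun a b => key b ≤ key a) := hs.tail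
    by_cases hlt : key y < key x
    · -- x goes in front of y
      have : PySem.List.insertBy (fun a b => decide (key b < key a)) x (y :: ys)
          = x :: y :: ys := by simp [PySem.List.insertBy, hlt]
      rw [this]
      cases hfy : List.find? p (y :: ys) with
      | none =>
        cases hpx : p x <;> simp [hpx, hfy, pvUpd]
      | some m =>
        have hm : m ∈ y :: ys := List.mem_of_find?_eq_some hfy
        have hkm : key m ≤ key y := by
          rcases List.mem_cons.mp hm with h | h
          · simp [h]
          · exact hy m h
        have hmx : key m < key x := lt_of_le_of_lt hkm hlt
        cases hpx : p x <;> simp [hpx, hfy, pvUpd, hmx]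
    · -- x goes after y
      have : PySem.List.insertBy (fun a b => decide (key b < key a)) x (y :: ys)
          = y :: PySem.List.insertBy (fun a b => decide (key b < key a)) x ys := by
        simp [PySem.List.insertBy, hlt]
      rw [this]
      cases hpy : p y with
      | true =>
        have hnot : ¬ key y < key x := hlt
        cases hpx : p x <;> simp [hpy, pvUpd, hpx, hnot]
      | false =>
        simpa [List.find?_cons, hpy] using ih hs'

-- find? over the stable length-descending sort = one-pass longest-first fold.
theorem pvFind_sorted_eq_foldl {α : Type} (p : α → Bool) (key : α → Int) (l : List α) :
    List.find? p (PySem.List.sorted l key true) = l.foldl (pvUpd p key) none := by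
  induction l using List.reverseRecOn with
  | nil => simp [PySem.List.sorted]
  | append_singleton l x ih =>
    have hsorted : PySem.List.sorted (l ++ [x]) key true
        = PySem.List.insertBy (fun a b => decide (key b < key a)) x (PySem.List.sorted l key true) := by
      rw [PySem.List.sorted_rev_eq_foldl_insertBy, PySem.List.sorted_rev_eq_foldl_insertBy,
        List.foldl_append]
      simp
    rw [hsorted, pvFind_insertBy p key x _ (PySem.List.sorted_pairwise_rev l key),
      List.foldl_append, ih]
    simp

-- B's step (with its Python condition order) is pvUpd for A's predicate.
theorem pvStep_eq_upd (line_lower : String) (best : Option String) (c : String) :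
    (if (c != "")
        && (match best with | none => true | some b => decide (PySem.Str.len b < PySem.Str.len c))
        && PySem.Str.isIn c line_lower
     then some c else best)
      = pvUpd (fun candidate => (candidate != "") && PySem.Str.isIn candidate line_lower)
          (fun k => PySem.Str.len k) best c := by
  unfold pvUpd
  cases hne : (c != "") <;> cases hin : PySem.Chars.isIn c.toList line_lower.toList <;>
    cases best <;> simp [hne, hin]

-- ===== VERDICT (by name: the statement is the Claim_ definition above) =====
theorem match_garnstudio_yarn_link_name_py_spec : Claim_equal_match_garnstudio_yarn_link_name_py := by
  intro line yarn_links _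
  unfold Spec_match_garnstudio_yarn_link_name_py
  unfold match_garnstudio_yarn_link_name_py match_garnstudio_yarn_link_name_py_alt
  by_cases h : yarn_links = []
  · subst h; simp [PySem.List.dedup]
  · simp only [h, if_false]
    rw [pvFind_sorted_eq_foldl]
    congr 1
    funext best c
    exact (pvStep_eq_upd (PySem.Str.lower line) best c).symm
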